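-- pv_equiv track=rewrite | github.com/jassylee/jassy-vibe-agent | color_vibe_player.py | _mood_to_search_words
-- ===== SOURCE A (Python) =====
-- def _mood_to_search_words(mood: str) -> list[str]:
--     words: list[str] =[]
--     for part in mood.split("/"):
--         for word in part.split():
--             w = word.strip()
--             if w:
--                 words.append(w)
--     return words
-- ===== SOURCE B (Python) =====
-- def _mood_to_search_words(mood: str) -> list[str]:
--     # Single character-level pass with an explicit accumulator: '/' and any
--     # whitespace char end the current token; no split/strip calls at all.
--     words: list[str] = []
--     cur: list[str] = []
--     for ch in mood:
--         if ch == "/" or ch.isspace():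
--             if cur:
--                 words.append("".join(cur))
--                 cur = []
--         else:
--             cur.append(ch)
--     if cur:
--         words.append("".join(cur))
--     return words
-- ===== Notes on version B (the rewrite author's own statement) =====
-- stated objective: alternative
-- what changed: Replaces A's two-level split pipeline (split on '/', inner whitespace split, strip, emptiness guard) by a single character-level scan with an explicit current-token accumulator that flushes on '/' or whitespace.
import Mathlib
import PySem

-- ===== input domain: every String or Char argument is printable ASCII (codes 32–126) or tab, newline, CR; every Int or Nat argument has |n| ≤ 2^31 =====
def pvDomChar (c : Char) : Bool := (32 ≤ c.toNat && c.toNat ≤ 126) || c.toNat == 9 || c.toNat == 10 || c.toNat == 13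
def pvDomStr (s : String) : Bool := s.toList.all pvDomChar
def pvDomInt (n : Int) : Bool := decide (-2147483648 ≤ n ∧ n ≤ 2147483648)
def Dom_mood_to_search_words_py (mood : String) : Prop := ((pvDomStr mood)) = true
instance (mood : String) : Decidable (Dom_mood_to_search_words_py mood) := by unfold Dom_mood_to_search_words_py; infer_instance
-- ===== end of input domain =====

-- B replaces A's two-level split pipeline (split on '/', inner whitespace split,
-- strip, emptiness guard) by one character-level scan with an explicit
-- current-token accumulator flushed on '/' or whitespace; same return value.

-- ===== PORT A =====
def mood_to_search_words_py (mood : String) : List String :=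
  ((PySem.Str.split? mood "/").getD []).foldl
    (fun words part =>
      (PySem.Str.split₀ part).foldl
        (fun words word =>
          let w := PySem.Str.strip word
          if w.toList = [] then words else words ++ [w])
        words)
    []

-- ===== PORT B =====
-- delimiter test of Source B's loop: ch == '/' or ch.isspace()
-- (PySem.Chars.isspace is exact for the ASCII/tab/newline/CR characters of Dom)
def pvBDelim (c : Char) : Bool := c == '/' || PySem.Chars.isspace c

-- one step of Source B's for-loop over the characters; state = (words, cur)
def pvBStep (st : List String × List Char) (ch : Char) : List String × List Char :=
  if pvBDelim ch then
    if st.2 = [] then st else (st.1 ++ [String.ofList st.2], [])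
  else (st.1, st.2 ++ [ch])

def mood_to_search_words_py_alt (mood : String) : List String :=
  let st := mood.toList.foldl pvBStep ([], [])
  if st.2 = [] then st.1 else st.1 ++ [String.ofList st.2]

-- ===== PRECONDITION & SPEC =====
def Spec_mood_to_search_words_py (mood : String) (out : List String) : Prop := out = mood_to_search_words_py_alt mood
instance (mood : String) (out : List String) : Decidable (Spec_mood_to_search_words_py mood out) := by unfold Spec_mood_to_search_words_py; infer_instance

-- ===== CLAIM (what is proved, stated in full; the proofs are below) =====
def Claim_equal_mood_to_search_words_py : Prop := ∀ (mood : String), Dom_mood_to_search_words_py mood → Spec_mood_to_search_words_py mood (mood_to_search_words_py mood)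

-- ===== LEMMAS AND PROOFS =====

-- chars that continue a whitespace-delimited token
def pvK (c : Char) : Bool := !PySem.Chars.isspace c

-- reference whitespace tokenizer
def pvToks : List Char → List (List Char)
  | [] => []
  | c :: r =>
      if PySem.Chars.isspace c then pvToks r
      else (c :: r.takeWhile pvK) :: pvToks (r.dropWhile pvK)
termination_by l => l.length
decreasing_by
  · simp only [List.length_cons]; omega
  · have := List.length_dropWhile_le pvK r; simp only [List.length_cons]; omega

-- split₀.go with pending token p (reversed cur) and remaining input l
def pvGlue (p l : List Char) : List (List Char) :=
  if p = [] then pvToks l else (p ++ l.takeWhile pvK) :: pvToks (l.dropWhile pvK)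

-- '/'-normalizing map
def pvF (c : Char) : Char := if c == '/' then ' ' else c

-- chars continuing a token of B's scan
def pvKD (c : Char) : Bool := !pvBDelim c

-- reference tokenizer for B's delimiter set ('/' or whitespace)
def pvToksD : List Char → List (List Char)
  | [] => []
  | c :: r =>
      if pvBDelim c then pvToksD r
      else (c :: r.takeWhile pvKD) :: pvToksD (r.dropWhile pvKD)
termination_by l => l.length
decreasing_by
  · simp only [List.length_cons]; omega
  · have := List.length_dropWhile_le pvKD r; simp only [List.length_cons]; omega

theorem pv_dropWhile_all_false (w : List Char) (h : ∀ c ∈ w, PySem.Chars.isspace c = false) :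
    w.dropWhile PySem.Chars.isspace = w := by
  cases w with
  | nil => rfl
  | cons c r => simp [h c (by simp)]

theorem pv_strip_id (w : List Char) (h : ∀ c ∈ w, PySem.Chars.isspace c = false) :
    PySem.Chars.strip w = w := by
  simp only [PySem.Chars.strip, PySem.Chars.lstrip, PySem.Chars.rstrip]
  rw [pv_dropWhile_all_false w h, pv_dropWhile_all_false w.reverse (by simpa using h),
    List.reverse_reverse]

theorem pv_split₀_go_eq (l : List Char) : ∀ cur acc,
    PySem.Chars.split₀.go l cur acc = acc.reverse ++ pvGlue cur.reverse l := by
  induction l with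
  | nil =>
    intro cur acc
    simp only [PySem.Chars.split₀.go, pvGlue, pvToks]
    by_cases h : cur = [] <;> simp [h, pvToks]
  | cons c rest ih =>
    intro cur acc
    simp only [PySem.Chars.split₀.go]
    by_cases hs : PySem.Chars.isspace c
    · by_cases hc : cur = []
      · subst hc
        simp [ih, pvGlue, pvToks, hs]
      · have hcr : cur.reverse ≠ [] := by simpa using hc
        simp only [hs, if_pos, List.isEmpty_iff, hc, ih]
        simp [pvGlue, hcr, pvToks, hs, pvK]
    · have hs' : PySem.Chars.isspace c = false := by simpa using hs
      simp only [hs', Bool.false_eq_true, if_false, ih]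
      have : (c :: cur).reverse = cur.reverse ++ [c] := by simp
      rw [this]
      congr 1
      simp only [pvGlue, List.append_ne_nil_of_right_ne_nil _ (by simp : [c] ≠ ([] : List Char))]
      by_cases hc : cur.reverse = []
      · simp [hc, pvToks, hs']
      · simp [hc, hs', pvK]

theorem pv_split₀_eq_toks (l : List Char) : PySem.Chars.split₀ l = pvToks l := by
  simpa [pvGlue] using pv_split₀_go_eq l [] []

theorem pv_toks_tokens (l : List Char) :
    ∀ w ∈ pvToks l, w ≠ [] ∧ ∀ c ∈ w, PySem.Chars.isspace c = false := by
  induction l using pvToks.induct with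
  | case1 => simp [pvToks]
  | case2 c r hs ih => simpa [pvToks, hs] using ih
  | case3 c r hs ih =>
    have hs' : PySem.Chars.isspace c = false := by simpa using hs
    intro w hw
    simp only [pvToks, hs', Bool.false_eq_true, if_false, List.mem_cons] at hw
    rcases hw with rfl | hw
    · refine ⟨by simp, ?_⟩
      intro d hd
      rcases List.mem_cons.mp hd with rfl | hd
      · exact hs'
      · have := List.mem_takeWhile_imp hd
        simpa [pvK] using this
    · exact ih w hw

theorem pv_splitOn_go_eq (fuel : Nat) : ∀ (l cur : List Char) (accs : List (List Char)),
    l.length ≤ fuel →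
    PySem.Chars.splitOn.go ['/'] fuel l cur accs =
      accs.reverse ++ List.modifyHead (cur.reverse ++ ·) (List.splitOnP (· == '/') l) := by
  induction fuel with
  | zero =>
    intro l cur accs h
    have hl : l = [] := by cases l <;> simp_all
    subst hl
    simp [PySem.Chars.splitOn.go, List.splitOnP_nil]
  | succ n ih =>
    intro l cur accs h
    cases l with
    | nil => simp [PySem.Chars.splitOn.go, List.splitOnP_nil]
    | cons c rest =>
      simp only [PySem.Chars.splitOn.go]
      by_cases hc : c = '/'
      · subst hc
        have hpre : List.isPrefixOf ['/'] ('/' :: rest) = true := by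
          simp [List.isPrefixOf]
        rw [if_pos hpre]
        rw [ih _ _ _ (by simpa using Nat.le_of_succ_le_succ h)]
        rw [List.splitOnP_cons]
        simp
        obtain ⟨hd, tl, heq⟩ := List.exists_cons_of_ne_nil (List.splitOnP_ne_nil (· == '/') rest)
        rw [heq]
        simp
      · have hpre : List.isPrefixOf ['/'] (c :: rest) = false := by
          simp [List.isPrefixOf]
          exact fun h' => absurd h'.symm hc
        rw [if_neg (by simp [hpre])]
        rw [ih _ _ _ (by simpa using Nat.le_of_succ_le_succ h)]
        rw [List.splitOnP_cons]
        have hcb : (c == '/') = false := by simpa using hc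
        rw [if_neg (by simp [hcb])]
        obtain ⟨hd, tl, heq⟩ := List.exists_cons_of_ne_nil (List.splitOnP_ne_nil _ rest)
        rw [heq]
        simp

theorem pv_splitOn_eq (l : List Char) :
    PySem.Chars.splitOn l ['/'] = List.splitOnP (· == '/') l := by
  rw [PySem.Chars.splitOn, pv_splitOn_go_eq (l.length + 1) l [] [] (by omega)]
  obtain ⟨hd, tl, heq⟩ := List.exists_cons_of_ne_nil (List.splitOnP_ne_nil (· == '/') l)
  rw [heq]
  simp

theorem pv_sepSplit (p : List Char) (c : Char) (x : List Char)
    (hp : ∀ a ∈ p, PySem.Chars.isspace a = false) (hc : PySem.Chars.isspace c = true) :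
    pvToks (p ++ c :: x) = pvToks p ++ pvToks x := by
  cases p with
  | nil => simp [pvToks, hc]
  | cons a p' =>
    have ha : PySem.Chars.isspace a = false := hp a (by simp)
    have hp' : ∀ b ∈ p', pvK b = true := by
      intro b hb; simp [pvK, hp b (by simp [hb])]
    have htake : (p' ++ c :: x).takeWhile pvK = p' := by
      rw [List.takeWhile_append]
      simp [List.takeWhile_eq_self_iff.mpr hp', pvK, hc]
    have hdrop : (p' ++ c :: x).dropWhile pvK = c :: x := by
      rw [List.dropWhile_append]
      simp [List.dropWhile_eq_nil_iff.mpr (fun b hb => hp' b hb), pvK, hc]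
    have htake' : p'.takeWhile pvK = p' := List.takeWhile_eq_self_iff.mpr hp'
    have hdrop' : p'.dropWhile pvK = [] := List.dropWhile_eq_nil_iff.mpr (fun b hb => hp' b hb)
    simp [pvToks, ha, htake, hdrop, htake', hdrop', hc]

theorem pv_flatMap_headI (r : List Char) :
    (List.splitOnP (· == '/') r).flatMap pvToks =
      pvToks (List.splitOnP (· == '/') r).headI ++
        ((List.splitOnP (· == '/') r).tail).flatMap pvToks := by
  obtain ⟨hd, tl, heq⟩ := List.exists_cons_of_ne_nil (List.splitOnP_ne_nil (· == '/') r)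
  rw [heq]
  simp

theorem pv_main (s : List Char) : ∀ p : List Char,
    (∀ c ∈ p, PySem.Chars.isspace c = false ∧ c ≠ '/') →
    pvToks (p ++ s.map pvF) =
      pvToks (p ++ (List.splitOnP (· == '/') s).headI) ++
        ((List.splitOnP (· == '/') s).tail).flatMap pvToks := by
  induction s with
  | nil =>
    intro p hp
    simp [List.splitOnP_nil]
  | cons c r ih =>
    intro p hp
    have hpns : ∀ a ∈ p, PySem.Chars.isspace a = false := fun a ha => (hp a ha).1
    rw [List.splitOnP_cons]
    by_cases hc : c = '/'
    · subst hc
      rw [if_pos (by simp)]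
      have hf : pvF '/' = ' ' := by simp [pvF]
      have hsp : PySem.Chars.isspace ' ' = true := by decide
      simp only [List.map_cons, hf, List.headI_cons, List.tail_cons, List.append_nil]
      rw [pv_sepSplit p ' ' (r.map pvF) hpns hsp]
      have hihr := ih [] (by simp)
      simp only [List.nil_append] at hihr
      rw [hihr, ← pv_flatMap_headI r]
    · have hcb : (c == '/') = false := by simpa using hc
      rw [if_neg (by simp [hcb])]
      obtain ⟨hd, tl, heq⟩ := List.exists_cons_of_ne_nil (List.splitOnP_ne_nil (· == '/') r)
      rw [heq]
      have hfc : pvF c = c := by simp [pvF, hc]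
      by_cases hs : PySem.Chars.isspace c = true
      · simp only [List.map_cons, hfc, List.modifyHead_cons, List.headI_cons, List.tail_cons]
        rw [pv_sepSplit p c (r.map pvF) hpns hs, pv_sepSplit p c hd hpns hs]
        have hihr := ih [] (by simp)
        simp only [List.nil_append, heq, List.headI_cons, List.tail_cons] at hihr
        rw [hihr]
        simp
      · have hs' : PySem.Chars.isspace c = false := by simpa using hs
        simp only [List.map_cons, hfc, List.modifyHead_cons, List.headI, List.tail_cons]
        have h1 : p ++ c :: r.map pvF = (p ++ [c]) ++ r.map pvF := by simp
        have h2 : p ++ c :: hd = (p ++ [c]) ++ hd := by simp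
        rw [h1, h2]
        have := ih (p ++ [c]) (by
          intro a ha
          rcases List.mem_append.mp ha with h | h
          · exact hp a h
          · simp at h; subst h; exact ⟨hs', hc⟩)
        rw [heq] at this
        simpa using this

-- chars-level steps matching port A's loop bodies
def pvCharInner (ws : List (List Char)) (w : List Char) : List (List Char) :=
  if PySem.Chars.strip w = [] then ws else ws ++ [PySem.Chars.strip w]

def pvCharOuter (ws : List (List Char)) (part : List Char) : List (List Char) :=
  (PySem.Chars.split₀ part).foldl pvCharInner ws

theorem pv_inner_fold (L : List (List Char))
    (hL : ∀ w ∈ L, w ≠ [] ∧ ∀ c ∈ w, PySem.Chars.isspace c = false) :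
    ∀ ws, L.foldl pvCharInner ws = ws ++ L := by
  induction L with
  | nil => simp
  | cons w L ih =>
    intro ws
    obtain ⟨hne, hns⟩ := hL w (by simp)
    have hstrip : PySem.Chars.strip w = w := pv_strip_id w hns
    simp only [List.foldl_cons, pvCharInner, hstrip, if_neg hne]
    rw [ih (fun v hv => hL v (by simp [hv])) (ws ++ [w])]
    simp

theorem pv_outer_fold (parts : List (List Char)) :
    ∀ ws, parts.foldl pvCharOuter ws = ws ++ parts.flatMap pvToks := by
  induction parts with
  | nil => simp
  | cons part parts ih =>
    intro ws
    have hbody : pvCharOuter ws part = ws ++ pvToks part := by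
      rw [pvCharOuter, pv_split₀_eq_toks]
      exact pv_inner_fold (pvToks part) (pv_toks_tokens part) ws
    simp only [List.foldl_cons, hbody, ih]
    simp

theorem pv_lift_inner (L : List (List Char)) : ∀ ws : List (List Char),
    (L.map String.ofList).foldl
      (fun words word =>
        let w := PySem.Str.strip word
        if w.toList = [] then words else words ++ [w])
      (ws.map String.ofList) = (L.foldl pvCharInner ws).map String.ofList := by
  induction L with
  | nil => simp
  | cons w L ih =>
    intro ws
    have hstrip : (PySem.Str.strip (String.ofList w)) = String.ofList (PySem.Chars.strip w) := by
      simp [PySem.Str.strip, String.toList_ofList]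
    have hcond : (PySem.Str.strip (String.ofList w)).toList = PySem.Chars.strip w := by
      simp [hstrip, String.toList_ofList]
    simp only [List.map_cons, List.foldl_cons, hcond, pvCharInner]
    by_cases h : PySem.Chars.strip w = []
    · simp only [h, if_pos]
      exact ih ws
    · simp only [if_neg h]
      rw [hstrip]
      have : ws.map String.ofList ++ [String.ofList (PySem.Chars.strip w)] =
          (ws ++ [PySem.Chars.strip w]).map String.ofList := by simp
      rw [this]
      exact ih (ws ++ [PySem.Chars.strip w])

theorem pv_lift_outer (parts : List (List Char)) : ∀ ws : List (List Char),
    (parts.map String.ofList).foldl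
      (fun words part =>
        (PySem.Str.split₀ part).foldl
          (fun words word =>
            let w := PySem.Str.strip word
            if w.toList = [] then words else words ++ [w])
          words)
      (ws.map String.ofList) = (parts.foldl pvCharOuter ws).map String.ofList := by
  induction parts with
  | nil => simp
  | cons part parts ih =>
    intro ws
    have hsplit : PySem.Str.split₀ (String.ofList part) =
        (PySem.Chars.split₀ part).map String.ofList := by
      simp [PySem.Str.split₀, String.toList_ofList]
    simp only [List.map_cons, List.foldl_cons, hsplit, pvCharOuter]
    rw [pv_lift_inner (PySem.Chars.split₀ part) ws]
    exact ih ((PySem.Chars.split₀ part).foldl pvCharInner ws)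

-- B-side: delimiter of B's scan matches whitespace after '/'-normalization
theorem pv_delim_eq (c : Char) : PySem.Chars.isspace (pvF c) = pvBDelim c := by
  by_cases hc : c = '/'
  · subst hc; decide
  · simp [pvF, pvBDelim, hc]

theorem pv_map_pvF_id (w : List Char) (h : ∀ c ∈ w, pvKD c = true) :
    w.map pvF = w := by
  have hid : ∀ c ∈ w, pvF c = c := by
    intro c hc
    have hk := h c hc
    simp only [pvKD, pvBDelim, Bool.not_or, Bool.and_eq_true, Bool.not_eq_eq_eq_not,
      Bool.not_true] at hk
    simp [pvF, hk.1]
  rw [List.map_congr_left hid]; simp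

-- pvToks after '/'-normalization is the tokenizer on B's delimiter set
theorem pv_toks_map_pvF (l : List Char) : pvToks (l.map pvF) = pvToksD l := by
  induction l using pvToksD.induct with
  | case1 => simp [pvToks, pvToksD]
  | case2 c r hd ih =>
    have : PySem.Chars.isspace (pvF c) = true := by rw [pv_delim_eq]; exact hd
    simp only [List.map_cons, pvToks, this, if_pos, pvToksD, hd]
    exact ih
  | case3 c r hd ih =>
    have hsp : PySem.Chars.isspace (pvF c) = false := by rw [pv_delim_eq]; simpa using hd
    have hKeq : ∀ x, pvK (pvF x) = pvKD x := by
      intro x; simp [pvK, pvKD, pv_delim_eq]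
    have hcomp : (pvK ∘ pvF) = pvKD := funext hKeq
    have htake : (r.map pvF).takeWhile pvK = (r.takeWhile pvKD).map pvF := by
      rw [List.takeWhile_map, hcomp]
    have hdrop : (r.map pvF).dropWhile pvK = (r.dropWhile pvKD).map pvF := by
      rw [List.dropWhile_map, hcomp]
    have hfc : pvF c = c := by
      have hk : pvKD c = true := by simpa [pvKD] using hd
      have := pv_map_pvF_id [c] (by intro x hx; simp at hx; subst hx; exact hk)
      simpa using this
    have htok : (r.takeWhile pvKD).map pvF = r.takeWhile pvKD :=
      pv_map_pvF_id _ (fun c hc => List.mem_takeWhile_imp hc)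
    rw [hfc] at hsp
    simp only [List.map_cons, pvToks, hsp, Bool.false_eq_true, if_false, htake, hdrop,
      htok, pvToksD, hd, ih, hfc]

-- glue form for B's fold
def pvGlueD (p l : List Char) : List (List Char) :=
  if p = [] then pvToksD l else (p ++ l.takeWhile pvKD) :: pvToksD (l.dropWhile pvKD)

theorem pv_bfold (l : List Char) : ∀ (ws : List String) (cur : List Char),
    (let st := l.foldl pvBStep (ws, cur)
     if st.2 = [] then st.1 else st.1 ++ [String.ofList st.2]) =
      ws ++ (pvGlueD cur l).map String.ofList := by
  induction l with
  | nil =>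
    intro ws cur
    by_cases h : cur = [] <;> simp [pvGlueD, h, pvToksD]
  | cons c r ih =>
    intro ws cur
    simp only [List.foldl_cons, pvBStep]
    by_cases hd : pvBDelim c
    · by_cases hc : cur = []
      · simp only [hd, if_pos, hc, if_pos]
        rw [ih ws []]
        simp [pvGlueD, pvToksD, hd, hc]
      · simp only [hd, if_pos, if_neg hc]
        rw [ih (ws ++ [String.ofList cur]) []]
        have hk : pvKD c = false := by simp [pvKD, hd]
        simp [pvGlueD, pvToksD, List.takeWhile_cons, List.dropWhile_cons, hk, hd, hc]
    · have hd' : pvBDelim c = false := by simpa using hd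
      simp only [hd', Bool.false_eq_true, if_false]
      rw [ih ws (cur ++ [c])]
      congr 1
      simp only [pvGlueD]
      rw [if_neg (by simp)]
      by_cases hc : cur = []
      · simp [hc, pvToksD, pvKD, hd']
      · simp [hc, pvKD, hd']

-- ===== VERDICT (by name: the statement is the Claim_ definition above) =====
theorem mood_to_search_words_py_spec : Claim_equal_mood_to_search_words_py := by
  intro mood _
  unfold Spec_mood_to_search_words_py mood_to_search_words_py mood_to_search_words_py_alt
  have hsep : ("/" : String).toList = ['/'] := rfl
  have hsplit? : PySem.Str.split? mood "/" =
      some ((PySem.Chars.splitOn mood.toList ['/']).map String.ofList) := by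
    simp [PySem.Str.split?, PySem.Chars.split?, hsep]
  rw [hsplit?]
  simp only [Option.getD_some]
  have hA := pv_lift_outer (PySem.Chars.splitOn mood.toList ['/']) []
  simp only [List.map_nil] at hA
  rw [hA]
  rw [pv_outer_fold _ []]
  simp only [List.nil_append]
  rw [pv_splitOn_eq]
  have hB := pv_bfold mood.toList [] []
  simp only [List.nil_append] at hB
  rw [hB]
  have hG : pvGlueD [] mood.toList = pvToksD mood.toList := by simp [pvGlueD]
  rw [hG, ← pv_toks_map_pvF]
  have hM := pv_main mood.toList [] (by simp)
  simp only [List.nil_append] at hM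
  rw [hM, ← pv_flatMap_headI]
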